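-- pv_equiv track=rewrite | github.com/MarioCalvarro/ACOM | entrega6.py | fft
-- ===== SOURCE A (Python) =====
-- def shift (f, t):
--     if t == 0:
--         return f
--
--     l = len(f)
--     aux = [0]*l
--
--     for j in range(l):
--         # la rotación tiene en cuenta que [u^n2] = [-1]
--         if j+t >= l or j+t<0:
--             aux[ ( j + t ) % l] = -f[j]
--
--         else:
--             aux[ ( j + t ) % l] = f[j]
--
--     return aux
--
-- def suma_vectores_mod(a,b,p):
--     l = []
--     for i in range(len(a)):
--         l += [(a[i]+b[i])%p]
--     return l
--
-- def resta_vectores_mod(a,b,p):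
--     l = []
--     for i in range(len(a)):
--         l += [(a[i]-b[i])%p]
--     return l
--
-- def fft (f, j, p):
--     n2 = len(f)
--     if n2 == 1:
--         return f
--
--     f_even = [0]*(n2//2)
--     f_odd  = [0]*(n2//2)
--
--     for i in range (n2//2):
--         f_even[i] = f[2*i]
--         f_odd[i]  = f[2*i + 1]
--
--     # xi**2 es como rotar dos veces, ie, 2*j
--     a_even = fft(f_even, 2*j, p)
--     a_odd  = fft(f_odd , 2*j, p)
--     a = [0] * n2
--
--     for i in range(n2//2):
--         # de nuevo, xi**i es como rotar i veces, ie, i*j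
--         shift_a_odd = shift (a_odd[i], i*j)
--
--         a[i]         = suma_vectores_mod (a_even[i], shift_a_odd, p)
--         a[i + n2//2] = resta_vectores_mod(a_even[i], shift_a_odd, p)
--
--     return a
-- ===== SOURCE B (Python) =====
-- # Iterative bottom-up FFT over the list of stride subproblems (no recursion, no bit reversal):
-- # state[r] is the FFT of the subsequence f[r::m] with twiddle parameter j*m; each pass halves m.
-- def shift (f, t):
--     if t == 0:
--         return f
--
--     l = len(f)
--     aux = [0]*l
--
--     for j in range(l):
--         # la rotación tiene en cuenta que [u^n2] = [-1]
--         if j+t >= l or j+t<0: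
--             aux[ ( j + t ) % l] = -f[j]
--
--         else:
--             aux[ ( j + t ) % l] = f[j]
--
--     return aux
--
-- def suma_vectores_mod(a,b,p):
--     l = []
--     for i in range(len(a)):
--         l += [(a[i]+b[i])%p]
--     return l
--
-- def resta_vectores_mod(a,b,p):
--     l = []
--     for i in range(len(a)):
--         l += [(a[i]-b[i])%p]
--     return l
--
-- def fft(f, j, p):
--     n = len(f)
--     if n <= 1:
--         return f
--     state = [[v] for v in f]
--     while len(state) > 1:
--         h = len(state) // 2
--         rot = j * h
--         new_state = []
--         for r in range(h):
--             ev, od = state[r], state[r + h]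
--             sums, difs = [], []
--             for i in range(len(ev)):
--                 y = shift(od[i], i * rot)
--                 sums.append(suma_vectores_mod(ev[i], y, p))
--                 difs.append(resta_vectores_mod(ev[i], y, p))
--             new_state.append(sums + difs)
--         state = new_state
--     return state[0]
-- ===== Notes on version B (the rewrite author's own statement) =====
-- stated objective: alternative
-- what changed: Replaces A's top-down even/odd recursion by a single iterative bottom-up pass that keeps a list of stride-subproblem FFTs (state[r] = FFT of f[r::m]) and halves it with the same shift/suma/resta butterfly until one block remains.
-- outside the precondition, e.g. on fft([[1], [2], [3]], 1, 5): A returns [[3], [4], 0], B returns [[3], [4]]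
import Mathlib
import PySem

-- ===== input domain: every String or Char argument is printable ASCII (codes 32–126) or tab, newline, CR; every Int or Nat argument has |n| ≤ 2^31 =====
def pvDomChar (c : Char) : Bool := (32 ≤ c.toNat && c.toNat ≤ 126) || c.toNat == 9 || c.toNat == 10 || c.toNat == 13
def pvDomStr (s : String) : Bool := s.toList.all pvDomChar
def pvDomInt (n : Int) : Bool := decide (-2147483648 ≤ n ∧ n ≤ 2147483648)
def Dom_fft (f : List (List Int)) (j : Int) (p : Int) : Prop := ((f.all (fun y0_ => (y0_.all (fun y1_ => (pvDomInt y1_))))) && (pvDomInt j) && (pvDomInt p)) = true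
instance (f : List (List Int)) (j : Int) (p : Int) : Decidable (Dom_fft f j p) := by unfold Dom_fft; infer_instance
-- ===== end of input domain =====

-- B replaces A's even/odd recursion by one iterative bottom-up pass over the list of stride
-- subproblems (state[r] = FFT of f[r::m]), reusing the same shift/suma/resta helpers; objective: alternative.

-- ===== PORT A =====
-- shared module helpers (identical in Source A and Source B)
-- shift(f, t): range(l) over a length is List.range; (j+t) % l is PySem.Int.mod (exact Python %)
def shiftP (f : List Int) (t : Int) : List Int :=
  if t = 0 then f
  else
    (List.range f.length).foldl
      (fun (aux : List Int) (jj : Nat) =>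
        aux.set (PySem.Int.mod ((jj : Int) + t) (f.length : Int)).toNat
          (if (f.length : Int) ≤ (jj : Int) + t ∨ (jj : Int) + t < 0 then -(f.getD jj 0) else f.getD jj 0))
      (List.replicate f.length 0)

-- suma_vectores_mod / resta_vectores_mod: a[i], b[i] are in range on every call reached under
-- Pre_fft (all coefficient vectors have one common length), so List.getD is exact there
def sumaP (a b : List Int) (p : Int) : List Int :=
  (List.range a.length).foldl (fun (l : List Int) (i : Nat) => l ++ [PySem.Int.mod (a.getD i 0 + b.getD i 0) p]) []

def restaP (a b : List Int) (p : Int) : List Int :=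
  (List.range a.length).foldl (fun (l : List Int) (i : Nat) => l ++ [PySem.Int.mod (a.getD i 0 - b.getD i 0) p]) []

-- the loop 'for i in range(n2//2): f_even[i] = f[2*i]; f_odd[i] = f[2*i+1]' on the two [0]*(n2//2)
-- arrays (placeholder [] instead of Python's integer 0: under Pre_fft every slot is overwritten)
def buildEO (fl : List (List Int)) (hn : Nat) : List (List Int) × List (List Int) :=
  (List.range hn).foldl
    (fun (st : List (List Int) × List (List Int)) (i : Nat) =>
      (st.1.set i (fl.getD (2 * i) []), st.2.set i (fl.getD (2 * i + 1) [])))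
    (List.replicate hn [], List.replicate hn [])

-- the combine loop of A: a = [0]*n2; for i in range(n2//2): a[i] = suma(..); a[i+n2//2] = resta(..)
-- (the local shift_a_odd is inlined: same value, used twice)
def combineA (aev aod : List (List Int)) (j p : Int) (n2 : Nat) : List (List Int) :=
  (List.range (n2 / 2)).foldl
    (fun (a : List (List Int)) (i : Nat) =>
      (a.set i (sumaP (aev.getD i []) (shiftP (aod.getD i []) ((i : Int) * j)) p)).set (i + n2 / 2)
        (restaP (aev.getD i []) (shiftP (aod.getD i []) ((i : Int) * j)) p))
    (List.replicate n2 [])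

lemma length_foldl_set {α : Type} (g : Nat → α) :
    ∀ (l : List Nat) (a : List α), (l.foldl (fun a i => a.set i (g i)) a).length = a.length := by
  intro l
  induction l with
  | nil => intro a; rfl
  | cons x xs ih => intro a; simp only [List.foldl_cons]; rw [ih]; simp

lemma buildEO_eq (fl : List (List Int)) (hn : Nat) :
    buildEO fl hn
      = ((List.range hn).foldl (fun (a : List (List Int)) (i : Nat) => a.set i (fl.getD (2 * i) [])) (List.replicate hn []),
         (List.range hn).foldl (fun (a : List (List Int)) (i : Nat) => a.set i (fl.getD (2 * i + 1) [])) (List.replicate hn [])) := by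
  unfold buildEO
  exact PySem.List.foldl_prod_mk
    (f := fun (a : List (List Int)) (i : Nat) => a.set i (fl.getD (2 * i) []))
    (g := fun (a : List (List Int)) (i : Nat) => a.set i (fl.getD (2 * i + 1) [])) _ _ _

lemma buildEO_fst_length (fl : List (List Int)) (hn : Nat) : (buildEO fl hn).1.length = hn := by
  rw [buildEO_eq]; dsimp only; rw [length_foldl_set]; simp

lemma buildEO_snd_length (fl : List (List Int)) (hn : Nat) : (buildEO fl hn).2.length = hn := by
  rw [buildEO_eq]; dsimp only; rw [length_foldl_set]; simp

-- port of A's fft; the n2 == 1 test is ported as ≤ 1 only so that the recursion is total: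
-- on n2 = 0 Python never returns (infinite recursion), which Pre_fft excludes
def fft (f : List (List Int)) (j : Int) (p : Int) : List (List Int) :=
  if h : f.length ≤ 1 then f
  else
    combineA (fft (buildEO f (f.length / 2)).1 (2 * j) p)
      (fft (buildEO f (f.length / 2)).2 (2 * j) p) j p f.length
termination_by f.length
decreasing_by
  · rw [buildEO_fst_length]; omega
  · rw [buildEO_snd_length]; omega

-- ===== PORT B =====
-- inner loop of B: builds sums and difs by appending, returns sums + difs
def combB (ev od : List (List Int)) (rot p : Int) : List (List Int) :=
  let sd :=
    (List.range ev.length).foldl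
      (fun (sd : List (List Int) × List (List Int)) (i : Nat) =>
        (sd.1 ++ [sumaP (ev.getD i []) (shiftP (od.getD i []) ((i : Int) * rot)) p],
         sd.2 ++ [restaP (ev.getD i []) (shiftP (od.getD i []) ((i : Int) * rot)) p]))
      (([], []) : List (List Int) × List (List Int))
  sd.1 ++ sd.2

-- one pass of B's while loop: h = len(state)//2, rot = j*h, new[r] = combine(state[r], state[r+h])
def stepB (s : List (List (List Int))) (j p : Int) : List (List (List Int)) :=
  (List.range (s.length / 2)).map
    (fun r => combB (s.getD r []) (s.getD (r + s.length / 2) []) (j * ((s.length / 2 : Nat) : Int)) p)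

lemma stepB_length (s : List (List (List Int))) (j p : Int) : (stepB s j p).length = s.length / 2 := by
  simp [stepB]

-- B's 'while len(state) > 1' loop, returning state[0]
def loopB (s : List (List (List Int))) (j p : Int) : List (List Int) :=
  if s.length ≤ 1 then s.headD []
  else loopB (stepB s j p) j p
termination_by s.length
decreasing_by rw [stepB_length]; omega

def fft_alt (f : List (List Int)) (j : Int) (p : Int) : List (List Int) :=
  if f.length ≤ 1 then f else loopB (f.map (fun v => [v])) j p

-- ===== PRECONDITION & SPEC =====
-- Pre_fft excludes exactly: lists whose length is not a power of two (A drops trailing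
-- coefficients and leaves integer 0 placeholders in the returned list — not a value of the
-- declared type — or never returns on []); inputs where some coefficient vector is longer than
-- the partner it is butterflied with — vector s is paired with vector s with its top bit cleared
-- (A raises IndexError there); and p = 0 when a modulus is actually computed (ZeroDivisionError).
def Pre_fft (f : List (List Int)) (j : Int) (p : Int) : Prop :=
  (∃ k, k ≤ f.length ∧ f.length = 2 ^ k) ∧
    (∀ s, s < f.length → 0 < s →
      (f.getD (s - 2 ^ Nat.log2 s) []).length ≤ (f.getD s []).length) ∧
    (f.length = 1 ∨ p ≠ 0 ∨ ∀ r, r < f.length / 2 → (f.getD r []).length = 0)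

instance (f : List (List Int)) (j : Int) (p : Int) : Decidable (Pre_fft f j p) := by
  unfold Pre_fft; infer_instance

def pvWitness_fft : List (List Int) × Int × Int := ([[1, 2], [3, 4]], 1, 5)

def Spec_fft (f : List (List Int)) (j : Int) (p : Int) (out : List (List Int)) : Prop := out = fft_alt f j p
instance (f : List (List Int)) (j : Int) (p : Int) (out : List (List Int)) : Decidable (Spec_fft f j p out) := by unfold Spec_fft; infer_instance

-- ===== CLAIM (what is proved, stated in full; the proofs are below) =====
def Claim_equal_fft : Prop := ∀ (f : List (List Int)) (j : Int) (p : Int), Dom_fft f j p → Pre_fft f j p → Spec_fft f j p (fft f j p)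

-- ===== LEMMAS AND PROOFS =====

-- the even- and odd-index subsequences, as A's loop produces them
def evens (s : List (List (List Int))) : List (List (List Int)) :=
  (List.range (s.length / 2)).map fun i => s.getD (2 * i) []

def odds (s : List (List (List Int))) : List (List (List Int)) :=
  (List.range (s.length / 2)).map fun i => s.getD (2 * i + 1) []

lemma evens_length (s : List (List (List Int))) : (evens s).length = s.length / 2 := by simp [evens]

lemma odds_length (s : List (List (List Int))) : (odds s).length = s.length / 2 := by simp [odds]

-- the recursive merge tree on a list of blocks: the common reference both ports are reduced to
def recM (s : List (List (List Int))) (j p : Int) : List (List Int) :=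
  if s.length ≤ 1 then s.headD []
  else combB (recM (evens s) (2 * j) p) (recM (odds s) (2 * j) p) j p
termination_by s.length
decreasing_by
  · rw [evens_length]; omega
  · rw [odds_length]; omega

lemma recM_singleton (x : List (List Int)) (j p : Int) : recM [x] j p = x := by
  rw [recM]; simp

lemma foldl_set_range_replicate {α : Type} (g : Nat → α) (d : α) :
    ∀ (m hn : Nat), m ≤ hn →
      (List.range m).foldl (fun a i => a.set i (g i)) (List.replicate hn d)
        = (List.range m).map g ++ List.replicate (hn - m) d := by
  intro m
  induction m with
  | zero => intro hn _; simp
  | succ m ih =>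
      intro hn hm
      rw [List.range_succ, List.foldl_append, ih hn (by omega)]
      simp only [List.foldl_cons, List.foldl_nil]
      have hrep : List.replicate (hn - m) d = d :: List.replicate (hn - (m + 1)) d := by
        have h1 : hn - m = (hn - (m + 1)) + 1 := by omega
        rw [h1, List.replicate_succ]
      rw [hrep, List.set_append_right _ _ (by simp), List.map_append]
      simp

lemma foldl_double_set_split {α : Type} (s d : Nat → α) (h : Nat) :
    ∀ (l : List Nat) (lo hi : List α), lo.length = h → (∀ i ∈ l, i < h) →
      l.foldl (fun a i => (a.set i (s i)).set (i + h) (d i)) (lo ++ hi)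
        = l.foldl (fun a i => a.set i (s i)) lo ++ l.foldl (fun a i => a.set i (d i)) hi := by
  intro l
  induction l with
  | nil => intro lo hi _ _; rfl
  | cons x xs ih =>
      intro lo hi hlo hmem
      simp only [List.foldl_cons]
      rw [List.set_append_left _ _ (by rw [hlo]; exact hmem x (by simp)),
        List.set_append_right _ _ (by simp [hlo]),
        show x + h - (lo.set x (s x)).length = x from by simp [hlo]]
      exact ih _ _ (by simp [hlo]) (fun i hi' => hmem i (by simp [hi']))

lemma combB_eq (ev od : List (List Int)) (rot p : Int) :
    combB ev od rot p
      = (List.range ev.length).map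
          (fun i => sumaP (ev.getD i []) (shiftP (od.getD i []) ((i : Int) * rot)) p)
        ++ (List.range ev.length).map
          (fun i => restaP (ev.getD i []) (shiftP (od.getD i []) ((i : Int) * rot)) p) := by
  have hpair :
      (List.range ev.length).foldl
        (fun (sd : List (List Int) × List (List Int)) (i : Nat) =>
          (sd.1 ++ [sumaP (ev.getD i []) (shiftP (od.getD i []) ((i : Int) * rot)) p],
           sd.2 ++ [restaP (ev.getD i []) (shiftP (od.getD i []) ((i : Int) * rot)) p]))
        ([], [])
      = ((List.range ev.length).foldl
          (fun (a : List (List Int)) (i : Nat) => a ++ [sumaP (ev.getD i []) (shiftP (od.getD i []) ((i : Int) * rot)) p]) [],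
         (List.range ev.length).foldl
          (fun (a : List (List Int)) (i : Nat) => a ++ [restaP (ev.getD i []) (shiftP (od.getD i []) ((i : Int) * rot)) p]) []) :=
    PySem.List.foldl_prod_mk
      (f := fun a i => a ++ [sumaP (ev.getD i []) (shiftP (od.getD i []) ((i : Int) * rot)) p])
      (g := fun a i => a ++ [restaP (ev.getD i []) (shiftP (od.getD i []) ((i : Int) * rot)) p]) _ _ _
  simp only [combB, hpair]
  rw [PySem.List.foldl_append_singleton_eq_map, PySem.List.foldl_append_singleton_eq_map]
  simp

lemma combineA_eq (aev aod : List (List Int)) (j p : Int) (h n2 : Nat)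
    (hl : aev.length = h) (hn2 : n2 = 2 * h) :
    combineA aev aod j p n2 = combB aev aod j p := by
  subst hn2
  unfold combineA
  have h2 : 2 * h / 2 = h := by omega
  rw [h2]
  rw [show List.replicate (2 * h) ([] : List Int) = List.replicate h [] ++ List.replicate h [] from by
    rw [← List.replicate_add]; congr 1; omega]
  rw [foldl_double_set_split
        (s := fun i => sumaP (aev.getD i []) (shiftP (aod.getD i []) ((i : Int) * j)) p)
        (d := fun i => restaP (aev.getD i []) (shiftP (aod.getD i []) ((i : Int) * j)) p)
        h (List.range h) _ _ (by simp) (fun i hi => List.mem_range.mp hi)]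
  rw [foldl_set_range_replicate _ _ h h le_rfl, foldl_set_range_replicate _ _ h h le_rfl]
  rw [combB_eq, hl]
  simp

lemma buildEO_fst_eq (fl : List (List Int)) (hn : Nat) :
    (buildEO fl hn).1 = (List.range hn).map (fun i => fl.getD (2 * i) []) := by
  rw [buildEO_eq]
  dsimp only
  rw [foldl_set_range_replicate _ _ hn hn le_rfl]
  simp

lemma buildEO_snd_eq (fl : List (List Int)) (hn : Nat) :
    (buildEO fl hn).2 = (List.range hn).map (fun i => fl.getD (2 * i + 1) []) := by
  rw [buildEO_eq]
  dsimp only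
  rw [foldl_set_range_replicate _ _ hn hn le_rfl]
  simp

lemma getD_map_sing (f : List (List Int)) (i : Nat) (hi : i < f.length) :
    (f.map (fun v => [v])).getD i [] = [f.getD i []] := by
  rw [List.getD_eq_getElem?_getD, List.getD_eq_getElem?_getD, List.getElem?_map,
    List.getElem?_eq_getElem hi]
  rfl

lemma length_foldl_inv {α β : Type} (F : List α → β → List α)
    (hF : ∀ a x, (F a x).length = a.length) :
    ∀ (l : List β) (a : List α), (l.foldl F a).length = a.length := by
  intro l
  induction l with
  | nil => intro a; rfl
  | cons x xs ih => intro a; simp only [List.foldl_cons]; rw [ih, hF]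

lemma combineA_length (aev aod : List (List Int)) (j p : Int) (n2 : Nat) :
    (combineA aev aod j p n2).length = n2 := by
  unfold combineA
  rw [length_foldl_inv
    (F := fun (a : List (List Int)) (i : Nat) =>
      (a.set i (sumaP (aev.getD i []) (shiftP (aod.getD i []) ((i : Int) * j)) p)).set (i + n2 / 2)
        (restaP (aev.getD i []) (shiftP (aod.getD i []) ((i : Int) * j)) p))
    (fun a x => by simp)]
  simp

lemma fft_length (f : List (List Int)) (j p : Int) : (fft f j p).length = f.length := by
  rw [fft]
  split
  · rfl
  · rw [combineA_length]

-- A's recursion equals the merge tree on singleton blocks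
lemma A_eq_recM : ∀ (k : Nat) (f : List (List Int)) (j p : Int), f.length = 2 ^ k →
    fft f j p = recM (f.map fun v => [v]) j p := by
  intro k
  induction k with
  | zero =>
      intro f j p hlen
      simp only [pow_zero] at hlen
      obtain ⟨v, rfl⟩ : ∃ v, f = [v] := by
        cases f with
        | nil => simp at hlen
        | cons a t =>
            cases t with
            | nil => exact ⟨a, rfl⟩
            | cons b u => simp at hlen
      rw [fft, recM]
      simp
  | succ k ih =>
      intro f j p hlen
      have hq : 1 ≤ 2 ^ k := Nat.one_le_two_pow
      have hlen2 : f.length = 2 * 2 ^ k := by rw [hlen]; ring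
      have h1 : ¬ f.length ≤ 1 := by omega
      rw [fft, dif_neg h1]
      have hhn : f.length / 2 = 2 ^ k := by omega
      rw [combineA_eq _ _ _ _ (f.length / 2) _ (by rw [fft_length, buildEO_fst_length]) (by omega)]
      rw [buildEO_fst_eq, buildEO_snd_eq, hhn]
      rw [ih _ (2 * j) p (by simp), ih _ (2 * j) p (by simp)]
      have hev : ((List.range (2 ^ k)).map (fun i => f.getD (2 * i) [])).map (fun v => [v])
          = evens (f.map fun v => [v]) := by
        unfold evens
        rw [List.map_map]
        simp only [List.length_map, hlen2, Nat.mul_div_cancel_left _ (by norm_num : 0 < 2)]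
        refine List.map_congr_left (fun i hi => ?_)
        have hi' : i < 2 ^ k := List.mem_range.mp hi
        rw [Function.comp_apply, getD_map_sing f (2 * i) (by omega)]
      have hod : ((List.range (2 ^ k)).map (fun i => f.getD (2 * i + 1) [])).map (fun v => [v])
          = odds (f.map fun v => [v]) := by
        unfold odds
        rw [List.map_map]
        simp only [List.length_map, hlen2, Nat.mul_div_cancel_left _ (by norm_num : 0 < 2)]
        refine List.map_congr_left (fun i hi => ?_)
        have hi' : i < 2 ^ k := List.mem_range.mp hi
        rw [Function.comp_apply, getD_map_sing f (2 * i + 1) (by omega)]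
      rw [hev, hod]
      conv_rhs => rw [recM]
      rw [if_neg (by simp only [List.length_map]; omega)]

-- one pass of B's loop commutes with taking the even-indexed subsequence …
lemma evens_stepB (s : List (List (List Int))) (j p : Int) (k : Nat)
    (hs : s.length = 2 ^ (k + 2)) :
    evens (stepB s j p) = stepB (evens s) (2 * j) p := by
  have hq : 1 ≤ 2 ^ k := Nat.one_le_two_pow
  have hlen4 : s.length = 4 * 2 ^ k := by rw [hs]; ring
  have hH : s.length / 2 = 2 * 2 ^ k := by omega
  unfold evens stepB
  simp only [List.length_map, List.length_range, hH]
  have hQ : 2 * 2 ^ k / 2 = 2 ^ k := by omega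
  rw [hQ]
  refine List.map_congr_left (fun i hi => ?_)
  have hi' : i < 2 ^ k := List.mem_range.mp hi
  rw [PySem.List.getD_map_range _ _ _ _ (by omega),
    PySem.List.getD_map_range _ _ _ _ (by omega),
    PySem.List.getD_map_range _ _ _ _ (by omega)]
  have e1 : 2 * i + 2 * 2 ^ k = 2 * (i + 2 ^ k) := by ring
  have e2 : j * ((2 * 2 ^ k : Nat) : Int) = 2 * j * ((2 ^ k : Nat) : Int) := by push_cast; ring
  rw [e1, e2]

-- … and with the odd-indexed subsequence
lemma odds_stepB (s : List (List (List Int))) (j p : Int) (k : Nat)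
    (hs : s.length = 2 ^ (k + 2)) :
    odds (stepB s j p) = stepB (odds s) (2 * j) p := by
  have hq : 1 ≤ 2 ^ k := Nat.one_le_two_pow
  have hlen4 : s.length = 4 * 2 ^ k := by rw [hs]; ring
  have hH : s.length / 2 = 2 * 2 ^ k := by omega
  unfold odds stepB
  simp only [List.length_map, List.length_range, hH]
  have hQ : 2 * 2 ^ k / 2 = 2 ^ k := by omega
  rw [hQ]
  refine List.map_congr_left (fun i hi => ?_)
  have hi' : i < 2 ^ k := List.mem_range.mp hi
  rw [PySem.List.getD_map_range _ _ _ _ (by omega),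
    PySem.List.getD_map_range _ _ _ _ (by omega),
    PySem.List.getD_map_range _ _ _ _ (by omega)]
  have e1 : 2 * i + 1 + 2 * 2 ^ k = 2 * (i + 2 ^ k) + 1 := by ring
  have e2 : j * ((2 * 2 ^ k : Nat) : Int) = 2 * j * ((2 ^ k : Nat) : Int) := by push_cast; ring
  rw [e1, e2]

-- one pass of B's loop leaves the merge-tree value unchanged
lemma recM_stepB : ∀ (k : Nat) (s : List (List (List Int))) (j p : Int),
    s.length = 2 ^ (k + 1) → recM (stepB s j p) j p = recM s j p := by
  intro k
  induction k with
  | zero =>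
      intro s j p hs
      norm_num at hs
      have hstep : stepB s j p = [combB (s.getD 0 []) (s.getD 1 []) (j * ((1 : Nat) : Int)) p] := by
        unfold stepB
        rw [hs]
        simp [List.range_one]
      rw [hstep, recM_singleton]
      rw [recM, if_neg (by omega)]
      have he : evens s = [s.getD 0 []] := by
        unfold evens; rw [hs]; simp [List.range_one]
      have ho : odds s = [s.getD 1 []] := by
        unfold odds; rw [hs]; simp [List.range_one]
      rw [he, ho, recM_singleton, recM_singleton]
      simp
  | succ k ih =>
      intro s j p hs
      have hq : 1 ≤ 2 ^ k := Nat.one_le_two_pow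
      have h4 : s.length = 4 * 2 ^ k := by rw [hs]; ring
      have hstepl : (stepB s j p).length = 2 ^ (k + 1) := by
        rw [stepB_length]
        have h5 : (2 : Nat) ^ (k + 1) = 2 * 2 ^ k := by ring
        omega
      have h5 : (2 : Nat) ^ (k + 1) = 2 * 2 ^ k := by ring
      rw [recM, if_neg (by rw [hstepl]; omega)]
      rw [evens_stepB s j p k hs, odds_stepB s j p k hs]
      rw [ih (evens s) (2 * j) p (by rw [evens_length]; omega)]
      rw [ih (odds s) (2 * j) p (by rw [odds_length]; omega)]
      conv_rhs => rw [recM]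
      rw [if_neg (by omega)]

-- B's while loop computes the merge tree
lemma loopB_eq_recM : ∀ (k : Nat) (s : List (List (List Int))) (j p : Int),
    s.length = 2 ^ k → loopB s j p = recM s j p := by
  intro k
  induction k with
  | zero =>
      intro s j p hs
      simp only [pow_zero] at hs
      rw [loopB, recM]
      simp [hs]
  | succ k ih =>
      intro s j p hs
      have hq : 1 ≤ 2 ^ k := Nat.one_le_two_pow
      have h2 : s.length = 2 * 2 ^ k := by rw [hs]; ring
      rw [loopB, if_neg (by omega)]
      rw [ih (stepB s j p) j p (by rw [stepB_length]; omega)]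
      exact recM_stepB k s j p hs

-- ===== VERDICT (by name: the statement is the Claim_ definition above) =====
theorem fft_spec : Claim_equal_fft := by
  intro f j p _ hpre
  obtain ⟨⟨k, _, hlen⟩, -, -⟩ := hpre
  show fft f j p = fft_alt f j p
  by_cases h1 : f.length ≤ 1
  · rw [fft_alt, if_pos h1, fft, dif_pos h1]
  · rw [fft_alt, if_neg h1]
    rw [loopB_eq_recM k (f.map fun v => [v]) j p (by simp [hlen])]
    exact A_eq_recM k f j p hlen
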